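-- pv_equiv track=rewrite | github.com/youth4ever/orion | Project EULER/pb137 Fibonacci golden nuggets.py | euler_137
-- ===== SOURCE A (Python) =====
-- def euler_137(target=15):
--     # Using: Fn+2 = Fn+1 + Fn -> Fn = Fn+2 - Fn+1
--     # --> A = ΣFn×x^n =  Σ(Fn+2-Fn+1)×x^n = ΣFn+2×x^n - ΣFn+1×x^n
--     # --> x^2×A = ΣFn+2×x^(n+2) - x×ΣFn+1×x^(n+1)  = A-x-x×A --> A=x/(1-x-x^2)
--     # (http://www.ilemaths.net/forum-sujet-432510.html)
--     # A=x/(1-x-x^2) --> Ax^2+(1+A)x-A=0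
--     # Δ=(1+A)^2+4A^2 = 5A^2+2A+1
--     # x = -((1+A)±√Δ)/2A --> √Δ must be an integer for the solutions to be radicals
--     # Δ = m^2 = 5A^2+2A+1 --> 5m^2 = (5A+1)^2+4
--     # Posing: x=5A+1 and y=m, the equation becomes: x^2 - 5y^2 = -4
--     # This is Pell's equation - special case decribed in www.jpr2718.org/pell.pdf (page 10)
--     # Minimal positive solution is (t,u)=(1,1)
--     # Solutions are given every 2 iterations
--
--     count,nugget,x,y = 0,0,1,1
--     while count < target:
--         x,y = (x+5*y)//2, (y+x)//2
--         x,y = (x+5*y)//2, (y+x)//2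
--         # Check that x = 5A+1:
--         if (x-1)%5 == 0:
--             nugget = (x-1)//5
--             count += 1
--     return nugget
-- ===== SOURCE B (Python) =====
-- def euler_137(target=15):
--     # n-th Fibonacci golden nugget = F(2n)*F(2n+1), computed by fast doubling.
--     if target <= 0:
--         return 0
--
--     def fib_pair(n):
--         # returns (F(n), F(n+1)) by fast doubling
--         if n == 0:
--             return (0, 1)
--         a, b = fib_pair(n >> 1)
--         c = a * (2 * b - a)
--         d = a * a + b * b
--         if n & 1:
--             return (d, c + d)
--         return (c, d)
--
--     f, g = fib_pair(2 * target)
--     return f * g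
-- ===== Notes on version B (the rewrite author's own statement) =====
-- stated objective: faster
-- what changed: Replaces the Pell-recurrence while-loop (2*target big-integer iterations with a mod-5 filter) by the closed form nugget(n) = F(2n)*F(2n+1) computed with fast-doubling Fibonacci, reaching the answer in O(log target) doubling steps.
import Mathlib
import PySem

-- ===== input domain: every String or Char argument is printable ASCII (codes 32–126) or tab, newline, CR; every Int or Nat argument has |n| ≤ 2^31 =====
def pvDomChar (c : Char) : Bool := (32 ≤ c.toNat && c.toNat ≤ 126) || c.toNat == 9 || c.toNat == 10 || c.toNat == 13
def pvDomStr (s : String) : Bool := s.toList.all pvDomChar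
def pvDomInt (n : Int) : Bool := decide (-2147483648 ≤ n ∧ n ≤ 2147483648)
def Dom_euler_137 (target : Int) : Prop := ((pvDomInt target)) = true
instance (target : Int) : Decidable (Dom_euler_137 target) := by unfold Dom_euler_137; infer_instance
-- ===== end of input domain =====

-- B replaces A's Pell-recurrence while-loop by the closed form F(2n)*F(2n+1) via fast-doubling Fibonacci (asymptotically faster).


-- ===== PORT A =====
-- one Pell step  x, y = (x+5*y)//2, (y+x)//2
def pvS1x (x y : Int) : Int := PySem.Int.floordiv (x + 5 * y) 2
def pvS1y (x y : Int) : Int := PySem.Int.floordiv (y + x) 2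
-- the two chained Pell steps done by one body of A's while loop
def pvX2 (x y : Int) : Int := pvS1x (pvS1x x y) (pvS1y x y)
def pvY2 (x y : Int) : Int := pvS1y (pvS1x x y) (pvS1y x y)

-- literal transliteration of A's while loop; the fuel only makes the recursion total
-- (count reaches target after exactly 2*target loop bodies, proved below), it changes no value
def loopA (T : Int) (fuel : Nat) (c nugget x y : Int) : Int :=
  match fuel with
  | 0 => nugget
  | fuel + 1 =>
    if c < T then
      if (pvX2 x y - 1) % 5 = 0 then
        loopA T fuel (c + 1) (PySem.Int.floordiv (pvX2 x y - 1) 5) (pvX2 x y) (pvY2 x y)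
      else
        loopA T fuel c nugget (pvX2 x y) (pvY2 x y)
    else nugget

def euler_137 (target : Int) : Int :=
  loopA target (2 * target).toNat 0 0 1 1

-- ===== PORT B =====
-- fast-doubling: fib_pair n = (F(n), F(n+1))
def fibPair (n : Nat) : Int × Int :=
  if h0 : n = 0 then (0, 1)
  else
    let p := fibPair (n / 2)
    let a := p.1
    let b := p.2
    let c := a * (2 * b - a)
    let d := a * a + b * b
    if n % 2 = 1 then (d, c + d) else (c, d)
termination_by n
decreasing_by exact Nat.div_lt_self (Nat.pos_of_ne_zero h0) one_lt_two

def euler_137_alt (target : Int) : Int :=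
  if target ≤ 0 then 0
  else
    let p := fibPair (2 * target).toNat
    p.1 * p.2

-- ===== PRECONDITION & SPEC =====
def Spec_euler_137 (target : Int) (out : Int) : Prop := out = euler_137_alt target
instance (target : Int) (out : Int) : Decidable (Spec_euler_137 target out) := by unfold Spec_euler_137; infer_instance

-- ===== CLAIM (what is proved, stated in full; the proofs are below) =====
def Claim_equal_euler_137 : Prop := ∀ (target : Int), Dom_euler_137 target → Spec_euler_137 target (euler_137 target)

-- ===== LEMMAS AND PROOFS =====

-- proof-side Fibonacci and Lucas numbers over Int
def fibI : Nat → Int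
  | 0 => 0
  | 1 => 1
  | n + 2 => fibI (n + 1) + fibI n

def luc : Nat → Int
  | 0 => 2
  | 1 => 1
  | n + 2 => luc (n + 1) + luc n

lemma luc_eq (n : Nat) : luc n = 2 * fibI (n + 1) - fibI n := by
  induction n using Nat.twoStepInduction with
  | zero => rfl
  | one => rfl
  | more n ih1 ih2 => simp only [luc, fibI] at *; linarith

lemma lucfib1 (n : Nat) : luc n + 5 * fibI n = 2 * luc (n + 1) := by
  rw [luc_eq, luc_eq, show n + 1 + 1 = n + 2 from rfl, show fibI (n+2) = fibI (n+1) + fibI n from rfl]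
  ring

lemma lucfib2 (n : Nat) : luc n + fibI n = 2 * fibI (n + 1) := by
  rw [luc_eq]; ring

lemma pvFdTwoMul (z : Int) : PySem.Int.floordiv (2 * z) 2 = z := by
  rw [PySem.Int.floordiv_eq_ediv_of_pos (by omega : (0:Int) < 2)]; omega

lemma pvFdFiveMul (z : Int) : PySem.Int.floordiv (5 * z) 5 = z := by
  rw [PySem.Int.floordiv_eq_ediv_of_pos (by omega : (0:Int) < 5)]; omega

lemma pvS1x_luc (n : Nat) : pvS1x (luc n) (fibI n) = luc (n + 1) := by
  rw [pvS1x, show luc n + 5 * fibI n = 2 * luc (n+1) from lucfib1 n, pvFdTwoMul]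

lemma pvS1y_luc (n : Nat) : pvS1y (luc n) (fibI n) = fibI (n + 1) := by
  rw [pvS1y, show fibI n + luc n = 2 * fibI (n+1) by linarith [lucfib2 n], pvFdTwoMul]

lemma pvX2_luc (n : Nat) : pvX2 (luc n) (fibI n) = luc (n + 2) := by
  rw [pvX2, pvS1x_luc, pvS1y_luc, pvS1x_luc]

lemma pvY2_luc (n : Nat) : pvY2 (luc n) (fibI n) = fibI (n + 2) := by
  rw [pvY2, pvS1x_luc, pvS1y_luc, pvS1y_luc]

lemma pvLuc4 (n : Nat) : 4 * luc (n + 2) = luc n + 5 * (fibI n + 2 * fibI (n + 1)) := by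
  have h1 := lucfib1 n
  have h2 := lucfib1 (n + 1)
  linarith

-- doubling identities
lemma fib_dbl (k : Nat) :
    fibI (2 * k + 1) = fibI k * fibI k + fibI (k + 1) * fibI (k + 1) ∧
    fibI (2 * k + 2) = fibI (k + 1) * (2 * fibI k + fibI (k + 1)) := by
  induction k with
  | zero => constructor <;> rfl
  | succ k ih =>
    obtain ⟨ihA, ihB⟩ := ih
    have e3 : 2 * (k + 1) + 1 = (2 * k + 1) + 2 := by ring
    have e4 : 2 * (k + 1) + 2 = (2 * k + 2) + 2 := by ring
    have r1 : fibI ((2 * k + 1) + 2) = fibI (2 * k + 2) + fibI (2 * k + 1) := rfl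
    have r2 : fibI ((2 * k + 2) + 2) = fibI (2 * k + 3) + fibI (2 * k + 2) := rfl
    have r3 : fibI (k + 2) = fibI (k + 1) + fibI k := rfl
    constructor
    · rw [e3, r1, ihA, ihB, r3]; ring
    · rw [e4, r2, show (2*k+3) = (2*k+1)+2 from rfl, r1, ihA, ihB, r3]; ring

lemma fib_dblC (k : Nat) : fibI (2 * k) = fibI k * (2 * fibI (k + 1) - fibI k) := by
  cases k with
  | zero => rfl
  | succ k =>
    have := (fib_dbl k).2
    have e : 2 * (k + 1) = 2 * k + 2 := by ring
    have r3 : fibI (k + 2) = fibI (k + 1) + fibI k := rfl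
    rw [e, this, r3]; ring

-- Cassini (even index)
lemma fib_cassini (k : Nat) :
    fibI (2 * k + 1) * fibI (2 * k + 1) - fibI (2 * k) * fibI (2 * k + 1)
      - fibI (2 * k) * fibI (2 * k) = 1 := by
  induction k with
  | zero => rfl
  | succ k ih =>
    have e1 : 2 * (k + 1) = (2 * k) + 2 := by ring
    have e2 : 2 * (k + 1) + 1 = (2 * k + 1) + 2 := by ring
    have r1 : fibI ((2 * k) + 2) = fibI (2 * k + 1) + fibI (2 * k) := rfl
    have r2 : fibI ((2 * k + 1) + 2) = fibI (2 * k + 2) + fibI (2 * k + 1) := rfl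
    rw [e2, e1, r2, show (2*k+2) = (2*k)+2 from rfl, r1]
    nlinarith [ih]

-- the golden-nugget identity: L(4c+1) = 5*F(2c)*F(2c+1) + 1
lemma idNug (c : Nat) : luc (4 * c + 1) = 5 * (fibI (2 * c) * fibI (2 * c + 1)) + 1 := by
  have hL : luc (4 * c + 1) = 2 * fibI (4 * c + 2) - fibI (4 * c + 1) := luc_eq _
  have hA : fibI (4 * c + 1) = fibI (2 * c) * fibI (2 * c) + fibI (2 * c + 1) * fibI (2 * c + 1) := by
    have := (fib_dbl (2 * c)).1
    rwa [show 2 * (2 * c) + 1 = 4 * c + 1 by ring] at this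
  have hB : fibI (4 * c + 2) = fibI (2 * c + 1) * (2 * fibI (2 * c) + fibI (2 * c + 1)) := by
    have := fib_dblC (2 * c + 1)
    rw [show 2 * (2 * c + 1) = 4 * c + 2 by ring] at this
    rw [this, show fibI (2*c+1+1) = fibI (2*c+1) + fibI (2*c) from rfl]
    ring
  have hC := fib_cassini c
  rw [hL, hA, hB]; nlinarith [hC]

-- fibPair computes (F n, F (n+1))
lemma fibPair_eq (n : Nat) : fibPair n = (fibI n, fibI (n + 1)) := by
  induction n using Nat.strong_induction_on with
  | _ n ih =>
    rw [fibPair]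
    by_cases h0 : n = 0
    · subst h0; rfl
    · rw [dif_neg h0, ih (n / 2) (by omega)]
      obtain ⟨m, hm⟩ : ∃ m, n / 2 = m := ⟨n / 2, rfl⟩
      rw [hm]
      by_cases hp : n % 2 = 1
      · have hn : n = 2 * m + 1 := by omega
        rw [if_pos hp]
        have hdA := (fib_dbl m).1
        have hdB := (fib_dbl m).2
        subst hn
        refine Prod.ext ?_ ?_
        · simpa using hdA.symm
        · simp only [show 2*m+1+1 = 2*m+2 from rfl, hdB]; ring
      · have hn : n = 2 * m := by omega
        rw [if_neg hp]
        subst hn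
        refine Prod.ext ?_ ?_
        · simpa using (fib_dblC m).symm
        · simpa using ((fib_dbl m).1).symm

-- unfolding lemmas for loopA
lemma loopA_exit (T : Int) (fuel : Nat) (c n x y : Int) (hc : ¬ c < T) :
    loopA T fuel c n x y = n := by
  cases fuel <;> simp [loopA, hc]

lemma loopA_step (T : Int) (fuel : Nat) (c n x y : Int) (hc : c < T) :
    loopA T (fuel + 1) c n x y =
      if (pvX2 x y - 1) % 5 = 0 then
        loopA T fuel (c + 1) (PySem.Int.floordiv (pvX2 x y - 1) 5) (pvX2 x y) (pvY2 x y)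
      else
        loopA T fuel c n (pvX2 x y) (pvY2 x y) := by
  simp [loopA, hc]

-- main loop characterisation: with enough fuel, A's loop lands on F(2T)*F(2T+1)
lemma pvMain (fuel : Nat) : ∀ (T : Int) (c : Nat), (c : Int) ≤ T → 2 * (T - c).toNat ≤ fuel →
    luc (4 * c + 1) % 5 = 1 →
    loopA T fuel c (fibI (2 * c) * fibI (2 * c + 1)) (luc (4 * c + 1)) (fibI (4 * c + 1))
      = fibI (2 * T.toNat) * fibI (2 * T.toNat + 1) := by
  induction fuel using Nat.strong_induction_on with
  | _ fuel ih =>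
    intro T c hcT hfuel h5
    by_cases hc : (c : Int) < T
    · obtain ⟨f, rfl⟩ : ∃ f, fuel = f + 1 + 1 := ⟨fuel - 2, by omega⟩
      have m3 : luc (4 * c + 3) % 5 = 4 := by
        have := pvLuc4 (4 * c + 1)
        rw [show 4*c+1+2 = 4*c+3 from rfl] at this; omega
      have m5 : luc (4 * c + 5) % 5 = 1 := by
        have := pvLuc4 (4 * c + 3)
        rw [show 4*c+3+2 = 4*c+5 from rfl] at this; omega
      -- first body: check fails (x ≡ 4 mod 5)
      rw [loopA_step _ _ _ _ _ _ hc, pvX2_luc, pvY2_luc,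
        show 4*c+1+2 = 4*c+3 from rfl, if_neg (by omega)]
      -- second body: check succeeds (x ≡ 1 mod 5)
      rw [loopA_step _ _ _ _ _ _ hc, pvX2_luc, pvY2_luc,
        show 4*c+3+2 = 4*c+5 from rfl, if_pos (by omega)]
      have hnug : PySem.Int.floordiv (luc (4 * c + 5) - 1) 5
          = fibI (2 * (c + 1)) * fibI (2 * (c + 1) + 1) := by
        rw [show (4*c+5) = 4*(c+1)+1 by ring, idNug (c + 1)]
        rw [show 5 * (fibI (2*(c+1)) * fibI (2*(c+1)+1)) + 1 - 1
              = 5 * (fibI (2*(c+1)) * fibI (2*(c+1)+1)) by ring, pvFdFiveMul]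
      have h5' : luc (4 * (c + 1) + 1) % 5 = 1 := by
        rw [show 4*(c+1)+1 = 4*c+5 by ring]; exact m5
      rw [hnug, show (4*c+5) = 4*(c+1)+1 by ring,
        show ((c:Int) + 1) = ((c + 1 : Nat) : Int) by push_cast; ring]
      exact ih f (by omega) T (c + 1) (by push_cast; omega) (by omega) h5'
    · rw [loopA_exit _ _ _ _ _ _ (by omega)]
      have : T.toNat = c := by omega
      rw [this]

-- ===== VERDICT (by name: the statement is the Claim_ definition above) =====
theorem euler_137_spec : Claim_equal_euler_137 := by
  intro target _
  unfold Spec_euler_137 euler_137 euler_137_alt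
  by_cases ht : target ≤ 0
  · rw [loopA_exit _ _ _ _ _ _ (by omega), if_pos ht]
  · rw [if_neg ht]
    have hmain := pvMain (2 * target).toNat target 0 (by omega) (by omega) rfl
    simp only [Nat.cast_zero] at hmain
    have hN : (2 * target).toNat = 2 * target.toNat := by omega
    show loopA target (2 * target).toNat 0 0 1 1
        = (fibPair (2 * target).toNat).1 * (fibPair (2 * target).toNat).2
    calc loopA target (2 * target).toNat 0 0 1 1
        = loopA target (2 * target).toNat 0 (fibI (2*0) * fibI (2*0+1)) (luc (4*0+1)) (fibI (4*0+1)) := rfl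
      _ = fibI (2 * target.toNat) * fibI (2 * target.toNat + 1) := hmain
      _ = (fibPair (2 * target).toNat).1 * (fibPair (2 * target).toNat).2 := by
          rw [fibPair_eq, hN]
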